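-- pv_equiv track=rewrite | github.com/Verruckterdrachen/transcription-project | tests/simulations/sim_bug32_gap_corruption_guards.py | join_texts_deduplicated
-- ===== SOURCE A (Python) =====
-- def join_texts_deduplicated(texts, debug=False):
--     if not texts: return ""
--     result = texts[0]
--     for i in range(1, len(texts)):
--         rw = result.split(); cw = texts[i].split()
--         ol = 0
--         for k in range(min(5, len(rw), len(cw)), 0, -1):
--             if [w.lower() for w in rw[-k:]] == [w.lower() for w in cw[:k]]:
--                 ol = k; break
--         result = result + ' ' + (' '.join(cw[ol:]) if ol else texts[i])
--     return result.strip()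
-- ===== SOURCE B (Python) =====
-- def join_texts_deduplicated(texts, debug=False):
--     # Different algorithm: the overlap length is computed as the longest proper
--     # border (prefix == suffix) of the single combined list
--     #   head-words(<=5, lowercased) + [''] + last-5 accumulated lowercased words,
--     # scanned ascending keeping the largest match; the '' sentinel (words are
--     # never empty) guarantees the border stays within head/tail.  Only a 5-word
--     # tail is maintained and output pieces are joined once at the end.
--     if not texts:
--         return ""
--     pieces = [texts[0]]
--     tail = [w.lower() for w in texts[0].split()][-5:]
--     for cur in texts[1:]:
--         cw = cur.split()
--         s = [w.lower() for w in cw[:5]] + [''] + tail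
--         ol = 0
--         for k in range(1, len(s)):
--             if s[:k] == s[len(s) - k:]:
--                 ol = k
--         pieces.append(' '.join(cw[ol:]) if ol else cur)
--         tail = (tail + [w.lower() for w in cw[ol:]])[-5:]
--     return ' '.join(pieces).strip()
-- ===== Notes on version B (the rewrite author's own statement) =====
-- stated objective: faster
-- what changed: B computes each overlap as the longest proper border (prefix==suffix, ascending max scan) of one combined list head-words + sentinel '' + cached 5-word tail, instead of A's descending comparison of tail-slices of the whole re-split accumulated string against head prefixes; B keeps only a 5-word tail and joins collected pieces once at the end.
import Mathlib
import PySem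

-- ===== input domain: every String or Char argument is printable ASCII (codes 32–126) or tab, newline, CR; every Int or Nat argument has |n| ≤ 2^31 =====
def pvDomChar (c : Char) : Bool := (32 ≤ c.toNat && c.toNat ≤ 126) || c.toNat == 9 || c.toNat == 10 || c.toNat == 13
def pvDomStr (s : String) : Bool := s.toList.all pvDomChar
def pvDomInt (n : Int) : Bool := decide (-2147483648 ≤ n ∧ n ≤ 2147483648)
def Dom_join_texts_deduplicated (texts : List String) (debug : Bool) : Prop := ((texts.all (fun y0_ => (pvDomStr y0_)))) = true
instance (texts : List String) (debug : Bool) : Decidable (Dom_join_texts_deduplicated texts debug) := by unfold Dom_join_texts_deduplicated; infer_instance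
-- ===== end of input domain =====

-- B computes each overlap as the longest proper border of ONE combined list
-- (≤5 lowercased head words ++ [""] sentinel ++ cached 5-word lowercased tail),
-- scanned ascending keeping the largest match, keeps only that 5-word tail and
-- joins the collected output pieces once at the end (objective: faster).

-- ===== PORT A =====
-- inner loop 'for k in range(min(5, len(rw), len(cw)), 0, -1): if [...] == [...]: ol = k; break'
def pvOlA (rw cw : List String) : Nat → Nat
  | 0 => 0
  | k+1 =>
    if (PySem.List.slice rw (some (-((k : Int)+1))) none).map PySem.Str.lower
        = (List.take (k+1) cw).map PySem.Str.lower
    then k+1 else pvOlA rw cw k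

-- one iteration of 'for i in range(1, len(texts))', which only reads texts[i]
def pvStepA (result t : String) : String :=
  let rw := PySem.Str.split₀ result
  let cw := PySem.Str.split₀ t
  let ol := pvOlA rw cw (min 5 (min rw.length cw.length))
  result ++ " " ++ (if ol ≠ 0 then PySem.Str.join " " (cw.drop ol) else t)

def join_texts_deduplicated (texts : List String) (debug : Bool) : String :=
  match texts with
  | [] => ""
  | t0 :: rest => PySem.Str.strip (rest.foldl pvStepA t0)

-- ===== PORT B =====
-- 'l[-5:]': exact, since Python clamps the negative start of a slice to 0
def pvLastN (n : Nat) (l : List String) : List String := l.drop (l.length - n)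

-- 'for k in range(1, len(s)): if s[:k] == s[len(s)-k:]: ol = k'  (longest proper border of s)
def pvOlB (s : List String) : Nat :=
  (List.range' 1 (s.length - 1)).foldl
    (fun ol k => if s.take k = s.drop (s.length - k) then k else ol) 0

-- one iteration of 'for cur in texts[1:]' over the state (pieces, tail)
def pvStepB (st : List String × List String) (cur : String) : List String × List String :=
  let cw := PySem.Str.split₀ cur
  let cl := cw.map PySem.Str.lower
  let ol := pvOlB (cl.take 5 ++ [""] ++ st.2)
  (st.1 ++ [if ol ≠ 0 then PySem.Str.join " " (cw.drop ol) else cur],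
   pvLastN 5 (st.2 ++ cl.drop ol))

def join_texts_deduplicated_alt (texts : List String) (debug : Bool) : String :=
  match texts with
  | [] => ""
  | t0 :: rest =>
    let st := rest.foldl pvStepB ([t0], pvLastN 5 ((PySem.Str.split₀ t0).map PySem.Str.lower))
    PySem.Str.strip (PySem.Str.join " " st.1)

-- ===== PRECONDITION & SPEC =====
def Spec_join_texts_deduplicated (texts : List String) (debug : Bool) (out : String) : Prop := out = join_texts_deduplicated_alt texts debug
instance (texts : List String) (debug : Bool) (out : String) : Decidable (Spec_join_texts_deduplicated texts debug out) := by unfold Spec_join_texts_deduplicated; infer_instance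

-- ===== CLAIM (what is proved, stated in full; the proofs are below) =====
def Claim_equal_join_texts_deduplicated : Prop := ∀ (texts : List String) (debug : Bool), Dom_join_texts_deduplicated texts debug → Spec_join_texts_deduplicated texts debug (join_texts_deduplicated texts debug)

-- ===== LEMMAS AND PROOFS =====

-- split₀.go only ever prepends finished words to acc, so acc factors out
theorem pv_go_acc (s : List Char) : ∀ cur acc, PySem.Chars.split₀.go s cur acc = acc.reverse ++ PySem.Chars.split₀.go s cur [] := by
  induction s with
  | nil => intro cur acc; simp [PySem.Chars.split₀.go]; split_ifs <;> simp
  | cons c rest ih =>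
    intro cur acc
    simp only [PySem.Chars.split₀.go]
    split_ifs with h1 h2
    · exact ih [] acc
    · rw [ih [] (cur.reverse :: acc), ih [] [cur.reverse]]; simp
    · exact ih (c :: cur) acc

-- splitting at an inserted space splits the two pieces independently
theorem pv_go_space (b : List Char) : ∀ (a cur : List Char) (acc : List (List Char)),
    PySem.Chars.split₀.go (a ++ ' ' :: b) cur acc = PySem.Chars.split₀.go a cur acc ++ PySem.Chars.split₀ b := by
  intro a
  induction a with
  | nil =>
    intro cur acc
    simp only [List.nil_append, PySem.Chars.split₀.go]
    have hsp : PySem.Chars.isspace ' ' = true := by decide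
    rw [if_pos hsp]
    split_ifs with h
    · rw [pv_go_acc]; rfl
    · rw [pv_go_acc]; simp [PySem.Chars.split₀]
  | cons c rest ih =>
    intro cur acc
    simp only [List.cons_append, PySem.Chars.split₀.go]
    split_ifs with h1 h2
    · exact ih [] acc
    · exact ih [] (cur.reverse :: acc)
    · exact ih (c :: cur) acc

theorem pv_split_append (r p : String) :
    PySem.Str.split₀ (r ++ " " ++ p) = PySem.Str.split₀ r ++ PySem.Str.split₀ p := by
  have h : List.map String.toList (PySem.Str.split₀ (r ++ " " ++ p))
      = List.map String.toList (PySem.Str.split₀ r ++ PySem.Str.split₀ p) := by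
    rw [PySem.Str.split₀_map_toList, List.map_append, PySem.Str.split₀_map_toList,
      PySem.Str.split₀_map_toList]
    have : (r ++ " " ++ p).toList = r.toList ++ ' ' :: p.toList := by
      simp [String.toList_append]
    rw [this]
    exact pv_go_space p.toList r.toList [] []
  exact List.map_injective_iff.mpr (fun a b hab => String.toList_inj.mp hab) h

-- each word produced by split() is nonempty and whitespace-free
def pvWord (w : List Char) : Prop := w ≠ [] ∧ ∀ c ∈ w, PySem.Chars.isspace c = false

theorem pv_go_words (s : List Char) : ∀ cur acc,
    (∀ c ∈ cur, PySem.Chars.isspace c = false) →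
    (∀ w ∈ acc, pvWord w) →
    ∀ w ∈ PySem.Chars.split₀.go s cur acc, pvWord w := by
  induction s with
  | nil =>
    intro cur acc hcur hacc w hw
    simp only [PySem.Chars.split₀.go] at hw
    split_ifs at hw with h
    · exact hacc w (by simpa using hw)
    · simp only [List.mem_reverse, List.mem_cons] at hw
      rcases hw with hw | hw
      · subst hw
        refine ⟨by simpa using h, fun c hc => hcur c (by simpa using hc)⟩
      · exact hacc w hw
  | cons c rest ih =>
    intro cur acc hcur hacc w hw
    simp only [PySem.Chars.split₀.go] at hw
    split_ifs at hw with h1 h2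
    · exact ih [] acc (by simp) hacc w hw
    · refine ih [] (cur.reverse :: acc) (by simp) ?_ w hw
      intro v hv
      rcases List.mem_cons.mp hv with hv | hv
      · subst hv; exact ⟨by simpa using h2, fun d hd => hcur d (by simpa using hd)⟩
      · exact hacc v hv
    · refine ih (c :: cur) acc ?_ hacc w hw
      intro d hd
      rcases List.mem_cons.mp hd with hd | hd
      · subst hd; simpa using h1
      · exact hcur d hd

theorem pv_split_words (s : String) : ∀ w ∈ PySem.Str.split₀ s, pvWord w.toList := by
  intro w hw
  have : w.toList ∈ PySem.Chars.split₀ s.toList := by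
    rw [← PySem.Str.split₀_map_toList]; exact List.mem_map_of_mem hw
  exact pv_go_words s.toList [] [] (by simp) (by simp) _ this

-- lowercasing a split() word keeps it nonempty
theorem pv_lower_ne_empty (w : String) (h : w.toList ≠ []) : PySem.Str.lower w ≠ "" := by
  intro hc
  have : (PySem.Str.lower w).toList = [] := by rw [hc]; rfl
  rw [PySem.Str.toList_lower] at this
  have : w.toList.map PySem.Chars.lowerChar = [] := this
  exact h (List.map_eq_nil_iff.mp this)

-- split() of a whitespace-free chunk
theorem pv_go_nospace (s : List Char) : ∀ cur acc, (∀ c ∈ s, PySem.Chars.isspace c = false) →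
    PySem.Chars.split₀.go s cur acc
      = acc.reverse ++ (if cur.reverse ++ s = [] then [] else [cur.reverse ++ s]) := by
  induction s with
  | nil =>
    intro cur acc _
    simp only [PySem.Chars.split₀.go]
    split_ifs with h1 h2 <;> simp_all
  | cons c rest ih =>
    intro cur acc hs
    simp only [PySem.Chars.split₀.go]
    have h1 : PySem.Chars.isspace c = false := hs c (by simp)
    rw [if_neg (by simp [h1])]
    rw [ih (c :: cur) acc (fun d hd => hs d (by simp [hd]))]
    simp

-- split() inverts ' '.join on lists of words
theorem pv_chars_split_join (wss : List (List Char)) (h : ∀ w ∈ wss, pvWord w) :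
    PySem.Chars.split₀ (PySem.Chars.join [' '] wss) = wss := by
  induction wss with
  | nil => simp [PySem.Chars.join_nil, PySem.Chars.split₀, PySem.Chars.split₀.go]
  | cons w rest ih =>
    match rest with
    | [] =>
      rw [PySem.Chars.join_singleton]
      have hw := h w (by simp)
      unfold PySem.Chars.split₀
      rw [pv_go_nospace w [] [] hw.2]
      simp [hw.1]
    | v :: rest' =>
      rw [PySem.Chars.join_cons_cons]
      have : w ++ [' '] ++ PySem.Chars.join [' '] (v :: rest') = w ++ ' ' :: PySem.Chars.join [' '] (v :: rest') := by simp
      rw [this]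
      unfold PySem.Chars.split₀
      rw [pv_go_space]
      have hw := h w (by simp)
      have : PySem.Chars.split₀.go w [] [] = [w] := by
        rw [pv_go_nospace w [] [] hw.2]; simp [hw.1]
      rw [this, ih (fun u hu => h u (by simp [hu]))]
      simp

theorem pv_split_join (ws : List String) (h : ∀ w ∈ ws, pvWord w.toList) :
    PySem.Str.split₀ (PySem.Str.join " " ws) = ws := by
  have key : List.map String.toList (PySem.Str.split₀ (PySem.Str.join " " ws)) = List.map String.toList ws := by
    rw [PySem.Str.split₀_map_toList, PySem.Str.toList_join]
    have : (" " : String).toList = [' '] := by decide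
    rw [this]
    exact pv_chars_split_join _ (fun w hw => by
      obtain ⟨u, hu, rfl⟩ := List.mem_map.mp hw
      exact h u hu)
  exact List.map_injective_iff.mpr (fun a b hab => String.toList_inj.mp hab) key

-- ' '.join over an appended element (String level)
theorem pv_join_snoc (parts : List String) (h : parts ≠ []) (p : String) :
    PySem.Str.join " " (parts ++ [p]) = PySem.Str.join " " parts ++ " " ++ p := by
  apply String.toList_inj.mp
  rw [PySem.Str.toList_join]
  simp only [String.toList_append, PySem.Str.toList_join]
  rw [List.map_append]
  induction parts with
  | nil => exact absurd rfl h
  | cons a rest ih =>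
    match rest with
    | [] => simp [PySem.Chars.join_singleton, PySem.Chars.join_cons_cons]
    | b :: rest' =>
      simp only [List.map_cons, List.cons_append, PySem.Chars.join_cons_cons] at *
      rw [ih (by simp)]
      simp

theorem pv_join_one (p : String) : PySem.Str.join " " [p] = p := by
  apply String.toList_inj.mp
  rw [PySem.Str.toList_join]
  simp [PySem.Chars.join_singleton]

theorem pv_lastN_eq (n : Nat) (l : List String) : pvLastN n l = (l.reverse.take n).reverse := by
  unfold pvLastN
  rw [List.take_reverse, List.reverse_reverse]

-- keeping only the last 5 elements is enough before truncating again
theorem pv_lastN_absorb (x y : List String) :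
    pvLastN 5 (pvLastN 5 x ++ y) = pvLastN 5 (x ++ y) := by
  rw [pv_lastN_eq, pv_lastN_eq, pv_lastN_eq]
  rw [List.reverse_append, List.reverse_reverse, List.reverse_append]
  rw [List.take_append, List.take_append, List.take_take]
  have : min (5 - y.reverse.length) 5 = 5 - y.reverse.length := by omega
  rw [this]

-- the last k ≤ 5 elements agree between the full list and its 5-tail
theorem pv_lastN_drop (lw : List String) (k : Nat) (hk : k ≤ min 5 lw.length) :
    (pvLastN 5 lw).drop ((pvLastN 5 lw).length - k) = lw.drop (lw.length - k) := by
  unfold pvLastN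
  rw [List.length_drop, List.drop_drop]
  congr 1
  omega

-- rw[-k:] for 1 ≤ k ≤ len(rw) is a drop
theorem pv_slice_neg (rw : List String) (j : Nat) (h1 : 1 ≤ j) (h2 : j ≤ rw.length) :
    PySem.List.slice rw (some (-(j : Int))) none = rw.drop (rw.length - j) := by
  unfold PySem.List.slice PySem.List.clampIdx
  have hneg : -(j : Int) < 0 := by omega
  have hge : ¬ ((rw.length : Int) + -(j : Int) < 0) := by omega
  simp only [if_pos hneg, if_neg hge]
  have ha : ((rw.length : Int) + -(j : Int)).toNat = rw.length - j := by omega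
  rw [ha]
  apply List.take_of_length_le
  rw [List.length_drop]

-- 'r is the largest k in [1,m] satisfying P, or 0 if none does'
def pvIsMax (P : Nat → Prop) (m r : Nat) : Prop :=
  (r = 0 ∧ ∀ k, 1 ≤ k → k ≤ m → ¬ P k) ∨ (1 ≤ r ∧ r ≤ m ∧ P r ∧ ∀ k, r < k → k ≤ m → ¬ P k)

theorem pvIsMax_unique {P : Nat → Prop} {m r r' : Nat}
    (h : pvIsMax P m r) (h' : pvIsMax P m r') : r = r' := by
  rcases h with ⟨h0, hall⟩ | ⟨h1, h2, hP, hmax⟩ <;>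
    rcases h' with ⟨h0', hall'⟩ | ⟨h1', h2', hP', hmax'⟩
  · omega
  · exact absurd hP' (hall r' h1' h2')
  · exact absurd hP (hall' r h1 h2)
  · rcases Nat.lt_trichotomy r r' with hlt | heq | hgt
    · exact absurd hP' (hmax r' hlt h2')
    · exact heq
    · exact absurd hP (hmax' r hgt h2)

-- P and Q pick the same maxima when Q k ↔ (k ≤ m ∧ P k) on [1,n]
theorem pvIsMax_transfer {P Q : Nat → Prop} {m n r : Nat} (hmn : m ≤ n)
    (hiff : ∀ k, 1 ≤ k → k ≤ n → (Q k ↔ (k ≤ m ∧ P k)))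
    (h : pvIsMax P m r) : pvIsMax Q n r := by
  rcases h with ⟨h0, hall⟩ | ⟨h1, h2, hP, hmax⟩
  · left
    refine ⟨h0, fun k hk1 hk2 hQ => ?_⟩
    obtain ⟨hkm, hPk⟩ := (hiff k hk1 hk2).mp hQ
    exact hall k hk1 hkm hPk
  · right
    refine ⟨h1, by omega, (hiff r h1 (by omega)).mpr ⟨h2, hP⟩, fun k hk1 hk2 hQ => ?_⟩
    obtain ⟨hkm, hPk⟩ := (hiff k (by omega) hk2).mp hQ
    exact hmax k hk1 hkm hPk

-- A's descending first-match search finds the maximum matching k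
theorem pvOlA_isMax (rw cw : List String) (m : Nat) :
    pvIsMax (fun j => (PySem.List.slice rw (some (-(j : Int))) none).map PySem.Str.lower
        = (cw.take j).map PySem.Str.lower) m (pvOlA rw cw m) := by
  induction m with
  | zero => left; exact ⟨rfl, by omega⟩
  | succ k ih =>
    unfold pvOlA
    have hc : (-((k : Int)+1)) = -(((k+1 : Nat) : Int)) := by push_cast; ring
    rw [hc]
    split_ifs with h
    · right; exact ⟨by omega, le_refl _, h, by omega⟩
    · rcases ih with ⟨h0, hall⟩ | ⟨h1, h2, hP, hmax⟩
      · left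
        refine ⟨h0, fun j hj1 hj2 hPj => ?_⟩
        rcases Nat.lt_or_ge j (k+1) with hlt | hge
        · exact hall j hj1 (by omega) hPj
        · have : j = k+1 := by omega
          subst this; exact h hPj
      · right
        refine ⟨h1, by omega, hP, fun j hj1 hj2 hPj => ?_⟩
        rcases Nat.lt_or_ge j (k+1) with hlt | hge
        · exact hmax j hj1 (by omega) hPj
        · have : j = k+1 := by omega
          subst this; exact h hPj

-- B's ascending keep-last scan finds the maximum matching k
theorem pvFoldB_isMax (s : List String) (n : Nat) :
    pvIsMax (fun k => s.take k = s.drop (s.length - k)) n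
      ((List.range' 1 n).foldl
        (fun ol k => if s.take k = s.drop (s.length - k) then k else ol) 0) := by
  induction n with
  | zero => left; exact ⟨rfl, by omega⟩
  | succ n ih =>
    rw [List.range'_1_concat, Nat.add_comm 1 n, List.foldl_append]
    simp only [List.foldl_cons, List.foldl_nil]
    split_ifs with h
    · right; exact ⟨by omega, le_refl _, h, by omega⟩
    · rcases ih with ⟨h0, hall⟩ | ⟨h1, h2, hP, hmax⟩
      · left
        refine ⟨h0, fun j hj1 hj2 hPj => ?_⟩
        rcases Nat.lt_or_ge j (n+1) with hlt | hge
        · exact hall j hj1 (by omega) hPj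
        · have : j = n+1 := by omega
          subst this; exact h hPj
      · right
        refine ⟨h1, by omega, hP, fun j hj1 hj2 hPj => ?_⟩
        rcases Nat.lt_or_ge j (n+1) with hlt | hge
        · exact hmax j hj1 (by omega) hPj
        · have : j = n+1 := by omega
          subst this; exact h hPj

-- the borders of p ++ [""] ++ t are exactly the head/tail overlaps ("" never a word)
theorem pv_border_iff (p t : List String) (hp : ∀ w ∈ p, w ≠ "") (ht : ∀ w ∈ t, w ≠ "")
    (k : Nat) (hk1 : 1 ≤ k) (hk2 : k ≤ p.length + t.length) :
    ((p ++ [""] ++ t).take k = (p ++ [""] ++ t).drop ((p ++ [""] ++ t).length - k))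
      ↔ (k ≤ p.length ∧ k ≤ t.length ∧ p.take k = t.drop (t.length - k)) := by
  set s := p ++ [""] ++ t with hs
  have hlen : s.length = p.length + 1 + t.length := by simp [hs]; omega
  -- the element of s at any index
  have hget : ∀ i, s[i]? = if i < p.length then p[i]?
      else if i = p.length then some "" else t[i - p.length - 1]? := by
    intro i
    by_cases hi : i < p.length
    · rw [if_pos hi, hs, List.getElem?_append_left (by simp; omega)]
      rw [List.getElem?_append_left hi]
    · rw [if_neg hi]
      by_cases he : i = p.length
      · subst he
        rw [hs, List.getElem?_append_left (by simp)]
        rw [List.getElem?_append_right (by omega)]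
        simp
      · rw [if_neg he, hs, List.getElem?_append_right (by simp; omega)]
        congr 1
        simp; omega
  -- border ↔ pointwise agreement on the first k positions
  have hpoint : (s.take k = s.drop (s.length - k)) ↔
      ∀ i, i < k → s[i]? = s[s.length - k + i]? := by
    constructor
    · intro heq i hik
      have := congrArg (fun l => l[i]?) heq
      simpa [List.getElem?_take, List.getElem?_drop, hik] using this
    · intro hpt
      apply List.ext_getElem?
      intro i
      rw [List.getElem?_take, List.getElem?_drop]
      by_cases hik : i < k
      · rw [if_pos hik]; exact hpt i hik
      · rw [if_neg hik]
        symm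
        exact List.getElem?_eq_none_iff.mpr (by omega)
  -- the suffix-prefix condition, pointwise
  have hpq : k ≤ p.length → k ≤ t.length →
      ((p.take k = t.drop (t.length - k)) ↔ ∀ i, i < k → p[i]? = t[t.length - k + i]?) := by
    intro hkp hkt
    constructor
    · intro heq i hik
      have := congrArg (fun l => l[i]?) heq
      simpa [List.getElem?_take, List.getElem?_drop, hik] using this
    · intro hpt
      apply List.ext_getElem?
      intro i
      rw [List.getElem?_take, List.getElem?_drop]
      by_cases hik : i < k
      · rw [if_pos hik]; exact hpt i hik
      · rw [if_neg hik]
        symm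
        exact List.getElem?_eq_none_iff.mpr (by omega)
  -- translating s-indices to p/t-indices on the overlap window
  have hsl : ∀ i, i < k → k ≤ p.length → s[i]? = p[i]? := by
    intro i hik hkp
    rw [hget i, if_pos (by omega)]
  have hsr : ∀ i, i < k → k ≤ t.length → s[s.length - k + i]? = t[t.length - k + i]? := by
    intro i hik hkt
    rw [hget (s.length - k + i)]
    rw [if_neg (by omega), if_neg (by omega)]
    congr 1
    omega
  constructor
  · intro heq
    have hkd := hpoint.mp heq
    have hkp : k ≤ p.length := by
      by_contra hgt
      have h := hkd p.length (by omega)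
      rw [hget p.length, hget (s.length - k + p.length)] at h
      rw [if_neg (by omega), if_pos rfl, if_neg (by omega), if_neg (by omega)] at h
      have hidx : s.length - k + p.length - p.length - 1 < t.length := by omega
      rw [List.getElem?_eq_getElem hidx] at h
      exact ht _ (List.getElem_mem _) (Option.some_injective _ h).symm
    have hkt : k ≤ t.length := by
      by_contra hgt
      have h := hkd (k - t.length - 1) (by omega)
      rw [hget (k - t.length - 1), hget (s.length - k + (k - t.length - 1))] at h
      rw [if_pos (by omega)] at h
      rw [if_neg (by omega), if_pos (by omega)] at h
      have hidx : k - t.length - 1 < p.length := by omega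
      rw [List.getElem?_eq_getElem hidx] at h
      exact hp _ (List.getElem_mem _) (Option.some_injective _ h)
    refine ⟨hkp, hkt, (hpq hkp hkt).mpr fun i hik => ?_⟩
    rw [← hsl i hik hkp, ← hsr i hik hkt]
    exact hkd i hik
  · rintro ⟨hkp, hkt, heq⟩
    refine hpoint.mpr fun i hik => ?_
    rw [hsl i hik hkp, hsr i hik hkt]
    exact (hpq hkp hkt).mp heq i hik

-- the two overlap computations agree
theorem pv_ol_eq (rw cw : List String)
    (hlw : ∀ w ∈ rw.map PySem.Str.lower, w ≠ "")
    (hcl : ∀ w ∈ cw.map PySem.Str.lower, w ≠ "") :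
    pvOlA rw cw (min 5 (min rw.length cw.length))
      = pvOlB ((cw.map PySem.Str.lower).take 5 ++ [""] ++ pvLastN 5 (rw.map PySem.Str.lower)) := by
  set lw := rw.map PySem.Str.lower with hlwdef
  set cl := cw.map PySem.Str.lower with hcldef
  set p := cl.take 5 with hpdef
  set tl := pvLastN 5 lw with htldef
  set s := p ++ [""] ++ tl with hsdef
  set m := min 5 (min rw.length cw.length) with hmdef
  have hlwlen : lw.length = rw.length := by rw [hlwdef, List.length_map]
  have hcllen : cl.length = cw.length := by rw [hcldef, List.length_map]
  have hplen : p.length = min 5 cw.length := by rw [hpdef, List.length_take]; omega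
  have htllen : tl.length = min 5 rw.length := by
    rw [htldef]; unfold pvLastN; rw [List.length_drop]; omega
  have hslen : s.length = p.length + 1 + tl.length := by simp [hsdef]; omega
  have hn : s.length - 1 = p.length + tl.length := by omega
  have hmn : m ≤ s.length - 1 := by omega
  -- each side is the maximum of an equivalent family of conditions
  have hA := pvOlA_isMax rw cw m
  have hB := pvFoldB_isMax s (s.length - 1)
  have hiff : ∀ k, 1 ≤ k → k ≤ s.length - 1 →
      ((s.take k = s.drop (s.length - k))
        ↔ (k ≤ m ∧ (PySem.List.slice rw (some (-(k : Int))) none).map PySem.Str.lower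
              = (cw.take k).map PySem.Str.lower)) := by
    intro k hk1 hk2
    rw [pv_border_iff p tl (fun w hw => hcl w (List.mem_of_mem_take hw))
      (fun w hw => hlw w (List.mem_of_mem_drop (htldef ▸ hw))) k hk1 (by omega)]
    constructor
    · rintro ⟨hkp, hkt, heq⟩
      have hkm : k ≤ m := by omega
      refine ⟨hkm, ?_⟩
      rw [pv_slice_neg rw k hk1 (by omega), List.map_drop, ← hlwdef, List.map_take, ← hcldef]
      rw [← hlwlen, ← pv_lastN_drop lw k (by omega), ← htldef]
      rw [← heq, hpdef, List.take_take]
      congr 1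
      omega
    · rintro ⟨hkm, heq⟩
      rw [pv_slice_neg rw k hk1 (by omega), List.map_drop, ← hlwdef] at heq
      rw [List.map_take, ← hcldef] at heq
      rw [← hlwlen, ← pv_lastN_drop lw k (by omega), ← htldef] at heq
      refine ⟨by omega, by omega, ?_⟩
      rw [heq, hpdef, List.take_take]
      congr 1
      omega
  exact pvIsMax_unique (pvIsMax_transfer hmn hiff hA) hB

-- one loop iteration preserves the simulation (B's tail is the 5-tail of A's lowered words)
theorem pv_step (parts : List String) (h : parts ≠ []) (t : String) :
    ∃ parts', parts' ≠ [] ∧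
      pvStepB (parts, pvLastN 5 ((PySem.Str.split₀ (PySem.Str.join " " parts)).map PySem.Str.lower)) t
        = (parts', pvLastN 5 ((PySem.Str.split₀ (PySem.Str.join " " parts')).map PySem.Str.lower)) ∧
      pvStepA (PySem.Str.join " " parts) t = PySem.Str.join " " parts' := by
  set r := PySem.Str.join " " parts with hr
  set rw := PySem.Str.split₀ r with hrw
  set lw := rw.map PySem.Str.lower with hlw
  set cw := PySem.Str.split₀ t with hcw
  set cl := cw.map PySem.Str.lower with hcl
  set tail := pvLastN 5 lw with htail
  have hlwne : ∀ w ∈ lw, w ≠ "" := by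
    intro w hw
    obtain ⟨u, hu, rfl⟩ := List.mem_map.mp hw
    exact pv_lower_ne_empty u (pv_split_words r u hu).1
  have hclne : ∀ w ∈ cl, w ≠ "" := by
    intro w hw
    obtain ⟨u, hu, rfl⟩ := List.mem_map.mp hw
    exact pv_lower_ne_empty u (pv_split_words t u hu).1
  have hol : pvOlA rw cw (min 5 (min rw.length cw.length))
      = pvOlB (cl.take 5 ++ [""] ++ tail) := pv_ol_eq rw cw hlwne hclne
  set ol := pvOlA rw cw (min 5 (min rw.length cw.length)) with holdef
  set piece := (if ol ≠ 0 then PySem.Str.join " " (cw.drop ol) else t) with hpiece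
  refine ⟨parts ++ [piece], by simp, ?_, ?_⟩
  · -- B's step produces the simulated state
    show pvStepB (parts, tail) t = _
    simp only [pvStepB]
    rw [← hcw, ← hcl, ← hol, ← hpiece]
    have hsplit_piece : PySem.Str.split₀ piece = cw.drop ol := by
      rw [hpiece]
      by_cases h0 : ol = 0
      · simp [h0, hcw]
      · rw [if_pos h0]
        exact pv_split_join _ (fun w hw => pv_split_words t w (List.mem_of_mem_drop hw))
    have hjoin' : PySem.Str.join " " (parts ++ [piece]) = r ++ " " ++ piece := pv_join_snoc parts h piece
    have hsplit' : PySem.Str.split₀ (PySem.Str.join " " (parts ++ [piece])) = rw ++ cw.drop ol := by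
      rw [hjoin', pv_split_append, ← hrw, hsplit_piece]
    rw [hsplit', List.map_append, ← hlw]
    rw [htail, pv_lastN_absorb, List.map_drop, ← hcl]
  · -- A's step is the join of B's parts
    show r ++ " " ++ piece = _
    rw [pv_join_snoc parts h piece]

theorem pv_foldl_inv (rest : List String) : ∀ parts, parts ≠ [] →
    rest.foldl pvStepA (PySem.Str.join " " parts)
      = PySem.Str.join " "
          ((rest.foldl pvStepB (parts, pvLastN 5 ((PySem.Str.split₀ (PySem.Str.join " " parts)).map PySem.Str.lower))).1) := by
  induction rest with
  | nil => intro parts _; rfl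
  | cons t rest' ih =>
    intro parts hparts
    obtain ⟨parts', hne, hB, hA⟩ := pv_step parts hparts t
    simp only [List.foldl_cons, hB, hA]
    exact ih parts' hne

-- ===== VERDICT (by name: the statement is the Claim_ definition above) =====
theorem join_texts_deduplicated_spec : Claim_equal_join_texts_deduplicated := by
  intro texts debug _
  unfold Spec_join_texts_deduplicated join_texts_deduplicated join_texts_deduplicated_alt
  match texts with
  | [] => rfl
  | t0 :: rest =>
    have h := pv_foldl_inv rest [t0] (by simp)
    simp only [pv_join_one] at h
    simp only [h]
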